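-- pv_equiv track=rewrite | github.com/Parkseojin2001/coding_test | 백준/Gold/2504. 괄호의 값/괄호의 값.py | solve
-- ===== SOURCE A (Python) =====
-- def solve(target_str: str) -> int:
--     stack = []
--     pairs = {")": ("(", 2), "]": ("[", 3)}
--
--     for c in target_str:
--         if c in "([":
--             stack.append(c)
--
--         else:
--             if c not in pairs:
--                 return 0
--
--             to_be_sum = 0
--             while stack and isinstance(stack[-1], int):
--                 to_be_sum += stack.pop()
--             c_open, val = pairs[c]
--
--             if not stack or stack[-1] != c_open:
--                 return 0
--
--             stack.pop()
--
--             stack.append(val if not to_be_sum else val * to_be_sum)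
--
--     if any(isinstance(v, str) for v in stack):
--         return 0
--
--     return sum(stack)
-- ===== SOURCE B (Python) =====
-- def solve(target_str: str) -> int:
--     stack = []
--     tmp = 1
--     ans = 0
--     prev = None
--     for c in target_str:
--         if c == '(':
--             stack.append(c)
--             tmp *= 2
--         elif c == '[':
--             stack.append(c)
--             tmp *= 3
--         elif c == ')':
--             if not stack or stack[-1] != '(':
--                 return 0
--             if prev == '(':
--                 ans += tmp
--             stack.pop()
--             tmp //= 2
--         elif c == ']':
--             if not stack or stack[-1] != '[':
--                 return 0
--             if prev == '[':
--                 ans += tmp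
--             stack.pop()
--             tmp //= 3
--         else:
--             return 0
--         prev = c
--     return 0 if stack else ans
-- ===== Notes on version B (the rewrite author's own statement) =====
-- stated objective: idiomatic
-- what changed: Replaces A's heterogeneous stack of chars and partial products (with an inner while-loop summing popped ints) by the standard running-multiplier technique: a char-only stack, one multiplier tmp updated by *2/*3 and //2,//3, and an accumulator ans added to exactly on immediately-closing pairs.
import Mathlib
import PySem

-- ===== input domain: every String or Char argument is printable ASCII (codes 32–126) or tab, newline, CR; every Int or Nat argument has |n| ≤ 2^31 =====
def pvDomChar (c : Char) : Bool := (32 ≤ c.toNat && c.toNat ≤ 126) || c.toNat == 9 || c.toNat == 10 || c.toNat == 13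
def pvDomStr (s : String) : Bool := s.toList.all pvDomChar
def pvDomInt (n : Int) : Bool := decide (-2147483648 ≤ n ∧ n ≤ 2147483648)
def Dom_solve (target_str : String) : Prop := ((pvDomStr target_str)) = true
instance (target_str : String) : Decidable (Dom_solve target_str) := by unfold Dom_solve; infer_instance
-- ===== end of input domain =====

-- B replaces A's mixed char/int stack by a char-only stack with a running multiplier and accumulator (idiomatic solution of BOJ 2504); return values proved identical on all strings.

-- ===== PORT A =====
-- A's stack holds either opening brackets (strings in Python) or ints.
inductive AItem : Type
  | op  : Char → AItem
  | num : Int → AItem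
deriving DecidableEq, Repr

-- pairs = {")": ("(", 2), "]": ("[", 3)}
def pairsA (c : Char) : Option (Char × Int) :=
  if c = ')' then some ('(', 2) else if c = ']' then some ('[', 3) else none

-- the while-loop: pop the run of top ints, summing them (stack top = list head)
def popNums : List AItem → Int × List AItem
  | AItem.num v :: rest =>
      let p := popNums rest
      (p.1 + v, p.2)
  | as => (0, as)

-- sum(stack) (only reached when all elements are ints)
def sumNums : List AItem → Int
  | [] => 0
  | AItem.num v :: r => v + sumNums r
  | AItem.op _ :: r => sumNums r

def goA : List Char → List AItem → Int
  | [], stack =>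
      if stack.any (fun i => match i with | AItem.op _ => true | AItem.num _ => false)
      then 0 else sumNums stack
  | c :: cs, stack =>
      if c = '(' || c = '[' then goA cs (AItem.op c :: stack)
      else
        match pairsA c with
        | none => 0
        | some (copen, val) =>
            let p := popNums stack
            match p.2 with
            | AItem.op c' :: rest =>
                if c' ≠ copen then 0
                else goA cs (AItem.num (if p.1 = 0 then val else val * p.1) :: rest)
            | _ => 0

def solve (target_str : String) : Int := goA target_str.toList []

-- ===== PORT B =====
def goB : List Char → List Char → Int → Int → Option Char → Int
  | [], bs, _, ans, _ => if bs.isEmpty then ans else 0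
  | c :: cs, bs, tmp, ans, prev =>
      if c = '(' then goB cs ('(' :: bs) (tmp * 2) ans (some c)
      else if c = '[' then goB cs ('[' :: bs) (tmp * 3) ans (some c)
      else if c = ')' then
        match bs with
        | '(' :: rest =>
            goB cs rest (PySem.Int.floordiv tmp 2)
              (if prev = some '(' then ans + tmp else ans) (some c)
        | _ => 0
      else if c = ']' then
        match bs with
        | '[' :: rest =>
            goB cs rest (PySem.Int.floordiv tmp 3)
              (if prev = some '[' then ans + tmp else ans) (some c)
        | _ => 0
      else 0

def solve_alt (target_str : String) : Int := goB target_str.toList [] 1 0 none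

-- ===== PRECONDITION & SPEC =====
def Spec_solve (target_str : String) (out : Int) : Prop := out = solve_alt target_str
instance (target_str : String) (out : Int) : Decidable (Spec_solve target_str out) := by unfold Spec_solve; infer_instance

-- ===== CLAIM (what is proved, stated in full; the proofs are below) =====
def Claim_equal_solve : Prop := ∀ (target_str : String), Dom_solve target_str → Spec_solve target_str (solve target_str)

-- ===== LEMMAS AND PROOFS =====

-- opening brackets in A's stack, top first
def opensOf : List AItem → List Char
  | [] => []
  | AItem.op c :: r => c :: opensOf r
  | AItem.num _ :: r => opensOf r

def weight (c : Char) : Int := if c = '(' then 2 else 3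

def wprod : List Char → Int
  | [] => 1
  | c :: r => weight c * wprod r

-- the value A's stack will still contribute: each int times the weights of opens below it
def contrib : List AItem → Int
  | [] => 0
  | AItem.op _ :: r => contrib r
  | AItem.num v :: r => v * wprod (opensOf r) + contrib r

def PrevOk : List AItem → Option Char → Prop
  | [], p => p = none
  | AItem.op c :: _, p => p = some c
  | AItem.num _ :: _, p => p ≠ some '(' ∧ p ≠ some '['

def StInv (as : List AItem) (bs : List Char) (tmp ans : Int) (prev : Option Char) : Prop :=
  bs = opensOf as ∧ tmp = wprod (opensOf as) ∧ ans = contrib as ∧ PrevOk as prev ∧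
    (∀ v, AItem.num v ∈ as → 0 < v)

lemma popNums_spec (as : List AItem) (hpos : ∀ v, AItem.num v ∈ as → 0 < v) :
    opensOf (popNums as).2 = opensOf as ∧
    contrib as = (popNums as).1 * wprod (opensOf as) + contrib (popNums as).2 ∧
    ((popNums as).2 = [] ∨ ∃ c r, (popNums as).2 = AItem.op c :: r) ∧
    ((popNums as).1 = 0 → (popNums as).2 = as) ∧
    (∀ v, AItem.num v ∈ (popNums as).2 → 0 < v) ∧
    (∀ v r, as = AItem.num v :: r → 0 < (popNums as).1) := by
  induction as with
  | nil => simp [popNums, contrib, opensOf]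
  | cons hd tl ih =>
    cases hd with
    | op c =>
      refine ⟨rfl, by simp [popNums, contrib], Or.inr ⟨c, tl, rfl⟩, fun _ => rfl, hpos, ?_⟩
      intro v r h; cases h
    | num v =>
      have hpos' : ∀ w, AItem.num w ∈ tl → 0 < w := fun w hw => hpos w (List.mem_cons_of_mem _ hw)
      obtain ⟨h1, h2, h3, h4, h5, _⟩ := ih hpos'
      have hv : 0 < v := hpos v List.mem_cons_self
      have hT : 0 ≤ (popNums tl).1 := by
        rcases tl with _ | ⟨hd', tl'⟩
        · simp [popNums]
        · cases hd' with
          | op c => simp [popNums]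
          | num w =>
            have := ih hpos'
            have hw : 0 < (popNums (AItem.num w :: tl')).1 := this.2.2.2.2.2 w tl' rfl
            omega
      refine ⟨?_, ?_, ?_, ?_, h5, ?_⟩
      · simpa [popNums, opensOf] using h1
      · simp only [popNums, contrib, opensOf]
        rw [h2]; ring
      · simpa [popNums] using h3
      · intro h0; exfalso; simp only [popNums] at h0; omega
      · intro w r _; simp only [popNums]; omega

lemma contrib_eq_sumNums (as : List AItem) (h : opensOf as = []) : contrib as = sumNums as := by
  induction as with
  | nil => rfl
  | cons hd tl ih =>
    cases hd with
    | op c => simp [opensOf] at h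
    | num v =>
      simp only [opensOf] at h
      simp [contrib, sumNums, h, wprod, ih h]

lemma any_op_iff (as : List AItem) :
    (as.any (fun i => match i with | AItem.op _ => true | AItem.num _ => false) = false) ↔ opensOf as = [] := by
  induction as with
  | nil => simp [opensOf]
  | cons hd tl ih =>
    cases hd with
    | op c => simp [opensOf]
    | num v => simpa [opensOf] using ih

lemma fdiv_cancel (P : Int) (k : Int) (hk : k ≠ 0) : PySem.Int.floordiv (k * P) k = P := by
  simp [PySem.Int.floordiv, Int.mul_fdiv_cancel_left _ hk]

-- facts about one matched closing step, shared by the ')' and ']' cases of the main induction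
lemma close_facts (as : List AItem) (prev : Option Char) (copen : Char)
    (hcopen : copen = '(' ∨ copen = '[') (hprev : PrevOk as prev)
    (hpos : ∀ v, AItem.num v ∈ as → 0 < v)
    (c' : Char) (r : List AItem) (hcr : (popNums as).2 = AItem.op c' :: r) (hc' : c' = copen) :
    (prev = some copen ↔ (popNums as).1 = 0) ∧ 0 ≤ (popNums as).1 := by
  obtain ⟨-, -, -, hZero, -, hNum⟩ := popNums_spec as hpos
  rcases as with _ | ⟨hd, tl⟩
  · simp [popNums] at hcr
  · cases hd with
    | op c0 =>
      have hT0 : (popNums (AItem.op c0 :: tl)).1 = 0 := by simp [popNums]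
      have has0 : (popNums (AItem.op c0 :: tl)).2 = AItem.op c0 :: tl := by simp [popNums]
      have hc0 : c0 = copen := by
        have := has0.symm.trans hcr; injection this with h1 _; rw [← hc']; injection h1
      simp only [PrevOk] at hprev
      exact ⟨⟨fun _ => hT0, fun _ => by rw [hprev, hc0]⟩, le_of_eq hT0.symm⟩
    | num v =>
      have hTpos : 0 < (popNums (AItem.num v :: tl)).1 := hNum v tl rfl
      simp only [PrevOk] at hprev
      refine ⟨⟨fun hp => ?_, fun h0 => absurd h0 (by omega)⟩, by omega⟩
      rcases hcopen with h | h
      · exact absurd (hp.trans (by rw [h])) hprev.1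
      · exact absurd (hp.trans (by rw [h])) hprev.2

-- the new invariant after one matched closing step
lemma close_inv (as : List AItem) (tmp ans : Int) (prev : Option Char) (copen cclose : Char)
    (hcopen : copen = '(' ∨ copen = '[') (val : Int) (hwc : weight copen = val)
    (hval2or3 : val = 2 ∨ val = 3)
    (hStInv : StInv as (copen :: opensOf ((popNums as).2.tail)) tmp ans prev)
    (hcc : cclose = ')' ∨ cclose = ']')
    (r : List AItem) (hcr : (popNums as).2 = AItem.op copen :: r) :
    StInv (AItem.num (if (popNums as).1 = 0 then val else val * (popNums as).1) :: r)
      (opensOf r) (PySem.Int.floordiv tmp val)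
      (if prev = some copen then ans + tmp else ans) (some cclose) := by
  obtain ⟨hbs, htmp, hans, hprev, hpos⟩ := hStInv
  obtain ⟨hOp1, hOp2, -, -, hPos', -⟩ := popNums_spec as hpos
  obtain ⟨hiff, hTnn⟩ := close_facts as prev copen hcopen hprev hpos copen r hcr rfl
  set T := (popNums as).1 with hT
  have hropens : opensOf ((popNums as).2.tail) = opensOf r := by rw [hcr]; rfl
  set P := wprod (opensOf r) with hP
  have htmpP : tmp = val * P := by rw [htmp, ← hOp1, hcr]; simp [opensOf, wprod, hwc, hP]
  have hvalne : val ≠ 0 := by rcases hval2or3 with h | h <;> simp [h]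
  have hdiv : PySem.Int.floordiv tmp val = P := by rw [htmpP]; exact fdiv_cancel P val hvalne
  have hansC : contrib as = T * (val * P) + contrib (AItem.op copen :: r) := by
    calc contrib as = T * wprod (opensOf as) + contrib (popNums as).2 := hOp2
      _ = T * (val * P) + contrib (AItem.op copen :: r) := by
          rw [← hOp1, hcr]; simp [opensOf, wprod, hwc, hP]
  have hcontr' : contrib (AItem.op copen :: r) = contrib r := rfl
  refine ⟨by simp [opensOf], by simp [opensOf, hdiv, hP], ?_, ?_, ?_⟩
  · by_cases hT0 : T = 0
    · rw [if_pos hT0, if_pos (hiff.2 hT0)]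
      simp only [contrib, ← hP]
      rw [hans, hansC, hcontr', htmpP, hT0]; ring
    · rw [if_neg hT0, if_neg (fun hp => hT0 (hiff.1 hp))]
      simp only [contrib, ← hP]
      rw [hans, hansC, hcontr']; ring
  · rcases hcc with h | h <;> subst h <;> exact ⟨by decide, by decide⟩
  · intro w hw
    rcases List.mem_cons.1 hw with h | h
    · injection h with h
      subst h
      by_cases hT0 : T = 0
      · rw [if_pos hT0]; rcases hval2or3 with hv | hv <;> rw [hv] <;> omega
      · rw [if_neg hT0]
        have : 0 < T := by omega
        rcases hval2or3 with hv | hv <;> rw [hv] <;> nlinarith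
    · exact hPos' w (by rw [hcr]; exact List.mem_cons_of_mem _ h)

lemma goA_eq_goB (cs : List Char) : ∀ (as : List AItem) (bs : List Char) (tmp ans : Int)
    (prev : Option Char), StInv as bs tmp ans prev → goA cs as = goB cs bs tmp ans prev := by
  induction cs with
  | nil =>
    intro as bs tmp ans prev ⟨hbs, _, hans, _, _⟩
    simp only [goA, goB]
    by_cases h : opensOf as = []
    · rw [if_neg (by simp [(any_op_iff as).2 h]), if_pos (by simp [hbs, h]),
        hans, contrib_eq_sumNums as h]
    · rw [if_pos ?_, if_neg (by simpa [hbs, List.isEmpty_iff] using h)]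
      cases hA : as.any (fun i => match i with | AItem.op _ => true | AItem.num _ => false)
      · exact absurd ((any_op_iff as).1 hA) h
      · rfl
  | cons c cs ih =>
    intro as bs tmp ans prev hStInv
    obtain ⟨hbs, htmp, hans, hprev, hpos⟩ := hStInv
    by_cases hop : c = '(' ∨ c = '['
    · -- opening bracket: both push
      have hA : goA (c :: cs) as = goA cs (AItem.op c :: as) := by
        rcases hop with h | h <;> simp [goA, h]
      rw [hA]
      have hStInv' : StInv (AItem.op c :: as) (c :: bs) (weight c * tmp) ans (some c) :=
        ⟨by simp [opensOf, hbs], by simp [opensOf, wprod, htmp], by simp [contrib, hans],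
         by simp [PrevOk], fun v hv => hpos v (by simpa [AItem.op.injEq] using hv)⟩
      rcases hop with h | h
      · subst h
        rw [show goB ('(' :: cs) bs tmp ans prev = goB cs ('(' :: bs) (tmp * 2) ans (some '(') from by
          simp [goB]]
        exact ih _ _ _ _ _ (by simpa [weight, mul_comm] using hStInv')
      · subst h
        rw [show goB ('[' :: cs) bs tmp ans prev = goB cs ('[' :: bs) (tmp * 3) ans (some '[') from by
          simp [goB]]
        exact ih _ _ _ _ _ (by simpa [weight, mul_comm] using hStInv')
    · rw [not_or] at hop
      obtain ⟨hne1, hne2⟩ := hop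
      obtain ⟨hOp1, -, hShape, -, -, -⟩ := popNums_spec as hpos
      by_cases hc1 : c = ')'
      · subst hc1
        have hgoA : goA (')' :: cs) as =
            (match (popNums as).2 with
             | AItem.op c' :: rest =>
                 if c' ≠ '(' then 0
                 else goA cs (AItem.num (if (popNums as).1 = 0 then 2
                                         else 2 * (popNums as).1) :: rest)
             | _ => 0) := by
          simp [goA, pairsA]
        rw [hgoA]
        split
        · rename_i c' rest heq
          have hbs' : bs = c' :: opensOf rest := by rw [hbs, ← hOp1, heq]; rfl
          subst hbs'
          by_cases hc' : c' = '('
          · subst hc'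
            rw [if_neg (show ¬(('(':Char) ≠ '(') from by simp)]
            rw [show goB (')' :: cs) ('(' :: opensOf rest) tmp ans prev =
                goB cs (opensOf rest) (PySem.Int.floordiv tmp 2)
                  (if prev = some '(' then ans + tmp else ans) (some ')') from by simp [goB]]
            exact ih _ _ _ _ _
              (close_inv as tmp ans prev '(' ')' (Or.inl rfl) 2 (by simp [weight]) (Or.inl rfl)
                ⟨by rw [heq, ← hOp1, heq]; rfl, htmp, hans, hprev, hpos⟩ (Or.inl rfl) rest heq)
          · rw [if_pos hc']
            have hz : goB (')' :: cs) (c' :: opensOf rest) tmp ans prev = 0 := by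
              simp [goB, hc']
            rw [hz]
        · rename_i hnm
          have hemp : (popNums as).2 = [] := by
            rcases hShape with h | ⟨c', r, h⟩
            · exact h
            · exact (hnm c' r h).elim
          have hbsnil : bs = [] := by rw [hbs, ← hOp1, hemp]; rfl
          subst hbsnil
          simp [goB]
      · by_cases hc2 : c = ']'
        · subst hc2
          have hgoA : goA (']' :: cs) as =
              (match (popNums as).2 with
               | AItem.op c' :: rest =>
                   if c' ≠ '[' then 0
                   else goA cs (AItem.num (if (popNums as).1 = 0 then 3
                                           else 3 * (popNums as).1) :: rest)
               | _ => 0) := by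
            simp [goA, pairsA]
          rw [hgoA]
          split
          · rename_i c' rest heq
            have hbs' : bs = c' :: opensOf rest := by rw [hbs, ← hOp1, heq]; rfl
            subst hbs'
            by_cases hc' : c' = '['
            · subst hc'
              rw [if_neg (show ¬(('[':Char) ≠ '[') from by simp)]
              rw [show goB (']' :: cs) ('[' :: opensOf rest) tmp ans prev =
                  goB cs (opensOf rest) (PySem.Int.floordiv tmp 3)
                    (if prev = some '[' then ans + tmp else ans) (some ']') from by simp [goB]]
              exact ih _ _ _ _ _
                (close_inv as tmp ans prev '[' ']' (Or.inr rfl) 3 (by simp [weight]) (Or.inr rfl)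
                  ⟨by rw [heq, ← hOp1, heq]; rfl, htmp, hans, hprev, hpos⟩ (Or.inr rfl) rest heq)
            · rw [if_pos hc']
              have hz : goB (']' :: cs) (c' :: opensOf rest) tmp ans prev = 0 := by
                simp [goB, hc']
              rw [hz]
          · rename_i hnm
            have hemp : (popNums as).2 = [] := by
              rcases hShape with h | ⟨c', r, h⟩
              · exact h
              · exact (hnm c' r h).elim
            have hbsnil : bs = [] := by rw [hbs, ← hOp1, hemp]; rfl
            subst hbsnil
            simp [goB]
        · -- non-bracket char: both return 0
          simp [goA, goB, hne1, hne2, hc1, hc2, pairsA]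

theorem solve_spec : Claim_equal_solve := by
  intro s _
  unfold Spec_solve solve solve_alt
  exact goA_eq_goB s.toList [] [] 1 0 none ⟨rfl, rfl, rfl, rfl, by intro v h; cases h⟩
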